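-- pv_equiv track=rewrite | github.com/CESNET/ndk-fpga | comp/pcie/ptc/comp/tag_manager/max_words_num_transcript_check.py | get_word_string
-- ===== SOURCE A (Python) =====
-- DOWN_REGIONS = 4
--
-- DOWN_REG_SIZE = 4
--
-- def get_word_string(word_bitmap):
--     # word bitmap ex: 0001 1111 0000 0000 -> region 2 full; region 3 contains 1 dword
--     t = "|"
--     for r in range(DOWN_REGIONS):
--         for d in range(DOWN_REG_SIZE):
--             t = ("#" if (word_bitmap & 1) == 1 else " ") + t
--             word_bitmap >>= 1
--         t = "|" + t
--     return t
-- ===== SOURCE B (Python) =====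
-- DOWN_REGIONS = 4
--
-- DOWN_REG_SIZE = 4
--
-- _NIB = ['    ', '   #', '  # ', '  ##', ' #  ', ' # #', ' ## ', ' ###',
--         '#   ', '#  #', '# # ', '# ##', '##  ', '## #', '### ', '####']
--
--
-- def get_word_string(word_bitmap):
--     # One table lookup per 4-bit region, joined left (region 3) to right (region 0).
--     return '|' + '|'.join(_NIB[(word_bitmap >> s) & 0xF] for s in (12, 8, 4, 0)) + '|'
-- ===== Notes on version B (the rewrite author's own statement) =====
-- stated objective: simpler
-- what changed: Replaces A's nested shift-and-prepend bit loop (building the string back-to-front one bit at a time) with a precomputed nibble lookup table: one shift-and-mask lookup per region, joined front-to-back.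
import Mathlib
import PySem

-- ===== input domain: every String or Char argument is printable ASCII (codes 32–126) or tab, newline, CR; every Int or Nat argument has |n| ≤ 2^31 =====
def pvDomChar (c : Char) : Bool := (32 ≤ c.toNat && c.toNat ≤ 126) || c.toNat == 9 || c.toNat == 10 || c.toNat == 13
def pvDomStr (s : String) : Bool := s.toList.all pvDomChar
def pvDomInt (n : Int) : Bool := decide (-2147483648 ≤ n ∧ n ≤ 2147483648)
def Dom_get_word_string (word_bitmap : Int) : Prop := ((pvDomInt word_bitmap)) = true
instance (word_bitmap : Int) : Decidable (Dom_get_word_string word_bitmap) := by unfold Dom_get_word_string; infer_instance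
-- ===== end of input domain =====

-- B replaces A's bit-by-bit shift-and-prepend loop by a precomputed nibble lookup table,
-- one shift-and-mask lookup per region, joined front-to-back (objective: simpler).

-- ===== PORT A =====
-- body of the inner 'for d' loop: prepend '#'/' ' for the low bit, then shift
def pvStepD (st : String × Int) : String × Int :=
  ((if PySem.Int.band st.2 1 = 1 then "#" else " ") ++ st.1, st.2 >>> (1 : Nat))

-- body of the outer 'for r' loop: run the inner loop, then prepend '|'
def pvStepR (st : String × Int) : String × Int :=
  let st2 := (List.range 4).foldl (fun s _ => pvStepD s) st
  ("|" ++ st2.1, st2.2)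

def get_word_string (word_bitmap : Int) : String :=
  ((List.range 4).foldl (fun s _ => pvStepR s) ("|", word_bitmap)).1

-- ===== PORT B =====
def pvNib : List String :=
  ["    ", "   #", "  # ", "  ##", " #  ", " # #", " ## ", " ###",
   "#   ", "#  #", "# # ", "# ##", "##  ", "## #", "### ", "####"]

def get_word_string_alt (word_bitmap : Int) : String :=
  "|" ++ PySem.Str.join "|"
        ([(12 : Nat), 8, 4, 0].map
          (fun (s : Nat) => pvNib[(PySem.Int.band (word_bitmap >>> s) 15).toNat]!)) ++ "|"

-- ===== PRECONDITION & SPEC =====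
def Spec_get_word_string (word_bitmap : Int) (out : String) : Prop := out = get_word_string_alt word_bitmap
instance (word_bitmap : Int) (out : String) : Decidable (Spec_get_word_string word_bitmap out) := by unfold Spec_get_word_string; infer_instance

-- ===== CLAIM (what is proved, stated in full; the proofs are below) =====
def Claim_equal_get_word_string : Prop := ∀ (word_bitmap : Int), Dom_get_word_string word_bitmap → Spec_get_word_string word_bitmap (get_word_string word_bitmap)

-- ===== LEMMAS AND PROOFS =====
theorem sr_div (x : Int) (s : Nat) : x >>> s = x / 2^s := by
  cases x with
  | ofNat n =>
    show Int.ofNat (n >>> s) = Int.ofNat n / 2^s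
    rw [Nat.shiftRight_eq_div_pow]
    rw [show Int.ofNat (n / 2^s) = ((n / 2^s : Nat) : Int) from rfl, Int.natCast_ediv]
    push_cast; rfl
  | negSucc n =>
    show Int.negSucc (n >>> s) = Int.negSucc n / 2^s
    rw [Nat.shiftRight_eq_div_pow]
    rw [show ((2:Int)^s) = ((2^s : Nat) : Int) by push_cast; ring]
    rw [Int.negSucc_ediv _ (by positivity)]
    rw [show Int.negSucc (n / 2^s) = -(((n / 2^s : Nat) : Int) + 1) from rfl, Int.natCast_ediv]
    push_cast; rfl

theorem band_one (a : Int) : PySem.Int.band a 1 = a % 2 := by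
  unfold PySem.Int.band
  split_ifs with h h2 h3
  · rw [show (1:Int).toNat = 1 from rfl, Nat.and_one_is_mod]
    omega
  · omega
  · rw [show (1:Int).toNat = 1 from rfl]
    rw [Nat.and_comm, Nat.and_one_is_mod]
    omega
  · omega

theorem band_fifteen (a : Int) : PySem.Int.band a 15 = a % 16 := by
  unfold PySem.Int.band
  split_ifs with h h2 h3
  · rw [show (15:Int).toNat = 15 from rfl, show (15:Nat) = 2^4-1 from rfl, Nat.and_two_pow_sub_one_eq_mod]
    omega
  · omega
  · rw [show (15:Int).toNat = 15 from rfl]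
    rw [Nat.and_comm, show (15:Nat) = 2^4-1 from rfl, Nat.and_two_pow_sub_one_eq_mod]
    omega
  · omega

theorem stepR_nib (st : String × Int) :
    pvStepR st = ("|" ++ (pvNib[(st.2 % 16).toNat]! ++ st.1), st.2 / 16) := by
  obtain ⟨t, w⟩ := st
  show pvStepR (t, w) = ("|" ++ (pvNib[(w % 16).toNat]! ++ t), w / 16)
  unfold pvStepR
  rw [show List.range 4 = [0, 1, 2, 3] from rfl]
  simp only [List.foldl]
  unfold pvStepD
  simp only [sr_div, band_one]
  have h2 : w / 2 / 2 / 2 / 2 = w / 16 := by omega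
  have c0 : w % 2 = (w % 16) % 2 := by omega
  have c1 : w / 2 % 2 = (w % 16) / 2 % 2 := by omega
  have c2 : w / 2 / 2 % 2 = (w % 16) / 4 % 2 := by omega
  have c3 : w / 2 / 2 / 2 % 2 = (w % 16) / 8 % 2 := by omega
  rw [show ((2:Int)^(1:Nat)) = 2 from rfl] at *
  simp only [c0, c1, c2, c3, h2]
  have hk : 0 ≤ w % 16 ∧ w % 16 < 16 := by omega
  set k := w % 16 with hkdef
  clear_value k
  obtain ⟨hk0, hk1⟩ := hk
  refine Prod.ext ?_ rfl
  interval_cases k <;>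
    · simp only [← String.append_assoc]
      congr 1

theorem get_word_string_eq (x : Int) :
    get_word_string x =
      "|" ++ (pvNib[(x / 4096 % 16).toNat]! ++ ("|" ++ (pvNib[(x / 256 % 16).toNat]! ++
        ("|" ++ (pvNib[(x / 16 % 16).toNat]! ++ ("|" ++ (pvNib[(x % 16).toNat]! ++ "|"))))))) := by
  unfold get_word_string
  rw [show List.range 4 = [0, 1, 2, 3] from rfl]
  simp only [List.foldl]
  simp only [stepR_nib]
  have e1 : x / 16 / 16 = x / 256 := by omega
  have e2 : x / 256 / 16 = x / 4096 := by omega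
  rw [e1, e2]

-- ===== VERDICT (by name: the statement is the Claim_ definition above) =====
theorem get_word_string_spec : Claim_equal_get_word_string := by
  intro x _
  show get_word_string x = get_word_string_alt x
  rw [get_word_string_eq]
  unfold get_word_string_alt
  simp only [List.map, band_fifteen, sr_div]
  rw [show ((2:Int)^(12:Nat)) = 4096 from rfl, show ((2:Int)^(8:Nat)) = 256 from rfl,
      show ((2:Int)^(4:Nat)) = 16 from rfl, show ((2:Int)^(0:Nat)) = 1 from rfl,
      Int.ediv_one]
  simp only [PySem.Str.join]
  rw [← String.toList_inj]
  simp [PySem.Chars.join, String.toList_append, List.intercalate, List.intersperse]
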